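-- pv_equiv track=rewrite | github.com/nsjjjjjj/coding_test_answer | 프로그래머스/0/181874. A 강조하기/A 강조하기.py | solution
-- ===== SOURCE A (Python) =====
-- def solution(myString):
--     answer = list(myString)
--     for i in range(len(answer)):
--         if answer[i] == 'a' or answer[i] == 'A':
--             answer[i] = answer[i].upper()
--         else:
--             answer[i] = answer[i].lower()
--     return ''.join(answer)
-- ===== SOURCE B (Python) =====
-- def solution(myString):
--     return myString.lower().replace('a', 'A')
-- ===== Notes on version B (the rewrite author's own statement) =====
-- stated objective: idiomatic
-- what changed: Replaces the indexed per-character branch-and-mutate loop with two whole-string library passes: lower() to normalize every character, then a single replace to re-uppercase the target letter.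
import Mathlib
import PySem

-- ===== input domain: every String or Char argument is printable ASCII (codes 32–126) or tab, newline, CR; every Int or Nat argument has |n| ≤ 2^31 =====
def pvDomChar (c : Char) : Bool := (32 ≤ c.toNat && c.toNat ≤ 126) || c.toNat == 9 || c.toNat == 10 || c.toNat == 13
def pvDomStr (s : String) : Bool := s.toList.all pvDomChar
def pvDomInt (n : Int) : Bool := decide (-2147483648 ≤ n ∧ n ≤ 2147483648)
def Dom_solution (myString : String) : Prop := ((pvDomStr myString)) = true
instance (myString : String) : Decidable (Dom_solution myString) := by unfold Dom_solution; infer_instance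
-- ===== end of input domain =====

-- B replaces A's indexed per-character branch loop with two whole-string passes: lower() then replace('a','A') (idiomatic).

-- ===== PORT A =====
-- answer = list(myString); for each position, 'a'/'A' → upper, else lower; ''.join(answer)
def solution (myString : String) : String :=
  let answer := myString.toList
  let answer := answer.map (fun ch =>
    if ch == 'a' || ch == 'A' then PySem.Chars.upperChar ch else PySem.Chars.lowerChar ch)
  String.ofList answer

-- ===== PORT B =====
-- return myString.lower().replace('a', 'A')
def solution_alt (myString : String) : String :=
  PySem.Str.replace (PySem.Str.lower myString) "a" "A"

-- ===== PRECONDITION & SPEC =====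
def Spec_solution (myString : String) (out : String) : Prop := out = solution_alt myString
instance (myString : String) (out : String) : Decidable (Spec_solution myString out) := by unfold Spec_solution; infer_instance

-- ===== CLAIM (what is proved, stated in full; the proofs are below) =====
def Claim_equal_solution : Prop := ∀ (myString : String), Dom_solution myString → Spec_solution myString (solution myString)

-- ===== LEMMAS AND PROOFS =====

-- replacing the single character 'a' by 'A' is a map over the characters
lemma replace_go_single (fuel : Nat) (l acc : List Char) (h : l.length ≤ fuel) :
    PySem.Chars.replace.go ['a'] ['A'] fuel l acc =
      acc.reverse ++ l.map (fun c => if c == 'a' then 'A' else c) := by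
  induction fuel generalizing l acc with
  | zero =>
    cases l with
    | nil => simp [PySem.Chars.replace.go]
    | cons c t => simp at h
  | succ n ih =>
    cases l with
    | nil => simp [PySem.Chars.replace.go]
    | cons c t =>
      simp only [List.length_cons, Nat.succ_le_succ_iff] at h
      by_cases hc : c = 'a'
      · subst hc
        rw [show PySem.Chars.replace.go ['a'] ['A'] (n+1) ('a' :: t) acc =
              PySem.Chars.replace.go ['a'] ['A'] n t ('A' :: acc) from by
            simp [PySem.Chars.replace.go, List.isPrefixOf]]
        rw [ih t ('A' :: acc) h]
        simp
      · rw [show PySem.Chars.replace.go ['a'] ['A'] (n+1) (c :: t) acc =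
              PySem.Chars.replace.go ['a'] ['A'] n t (c :: acc) from by
            simp [PySem.Chars.replace.go, List.isPrefixOf]
            intro hac; exact absurd hac.symm hc]
        rw [ih t (c :: acc) h]
        simp [hc]

lemma replace_single (l : List Char) :
    PySem.Chars.replace l ['a'] ['A'] = l.map (fun c => if c == 'a' then 'A' else c) := by
  simp [PySem.Chars.replace, replace_go_single l.length l [] (le_refl _)]

-- lowering a character other than 'a'/'A' never yields 'a'
lemma lowerChar_ne_a (c : Char) (ha : c ≠ 'a') (hA : c ≠ 'A') :
    PySem.Chars.lowerChar c ≠ 'a' := by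
  unfold PySem.Chars.lowerChar
  split_ifs with h
  · unfold PySem.Chars.isupper at h
    simp only [Bool.and_eq_true, decide_eq_true_eq, Char.le_def] at h
    have hv : c.toNat = c.val.toNat := rfl
    have hb : c.toNat ≤ 90 := by
      have h2 := h.2; rw [UInt32.le_iff_toNat_le] at h2
      have : ('Z' : Char).val.toNat = 90 := by decide
      omega
    have hb2 : 65 ≤ c.toNat := by
      have h1 := h.1; rw [UInt32.le_iff_toNat_le] at h1
      have : ('A' : Char).val.toNat = 65 := by decide
      omega
    intro hcon
    have ht : (Char.ofNat (c.toNat + 32)).toNat = c.toNat + 32 := by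
      rw [Char.toNat_ofNat, if_pos (Or.inl (by omega))]
    rw [hcon] at ht
    have h97 : ('a' : Char).toNat = 97 := by decide
    rw [h97] at ht
    have h65 : c.toNat = 65 := by omega
    apply hA
    apply Char.ext
    apply UInt32.toNat_inj.mp
    rw [← hv, h65]
    decide
  · exact ha

-- pointwise agreement of the two per-character transforms
lemma char_pointwise (c : Char) :
    (if PySem.Chars.lowerChar c == 'a' then 'A' else PySem.Chars.lowerChar c) =
      (if c == 'a' || c == 'A' then PySem.Chars.upperChar c else PySem.Chars.lowerChar c) := by
  by_cases ha : c = 'a'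
  · subst ha; decide
  · by_cases hA : c = 'A'
    · subst hA; decide
    · simp [ha, hA, lowerChar_ne_a c ha hA]

-- ===== VERDICT (by name: the statement is the Claim_ definition above) =====
theorem solution_spec : Claim_equal_solution := by
  intro s _
  unfold Spec_solution solution solution_alt
  apply String.toList_injective
  rw [PySem.Str.toList_replace, PySem.Str.toList_lower]
  rw [show ("a" : String).toList = ['a'] from rfl, show ("A" : String).toList = ['A'] from rfl]
  rw [replace_single, PySem.Chars.lower, List.map_map, String.toList_ofList]
  exact (List.map_congr_left (fun c _ => (char_pointwise c))).symm
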